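-- pv_equiv track=rewrite | github.com/0x32767/Python-British-Informatics-Olympiad-Solutions | 2017/question1.py | solution
-- ===== SOURCE A (Python) =====
-- def solution(colors: list[str]):
--     while len(colors) > 1:
--         new_colors = []
--
--         for i in range(len(colors) - 1):
--             left = colors[i]
--             right = colors[i + 1]
--
--             if left == right:
--                 new_colors.append(left)
--
--             else:
--                 # returns a set with one element hence the comma after `remaining`
--                 remaining, = {"R", "G", "B"} - {left, right}
--                 new_colors.append(remaining)
--
--         colors = new_colors
--     return colors[0]
-- ===== SOURCE B (Python) =====
-- def solution(colors: list[str]):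
--     # If only one distinct colour appears, it survives every reduction step.
--     if len(set(colors)) == 1:
--         return colors[0]
--     # Closed form: the pairwise rule (equal -> same, different -> the third colour)
--     # is x, y -> -(x + y) mod 3 under R=0, G=1, B=2, so the final colour is
--     # (-1)^(n-1) * sum(C(n-1, i) * c_i) mod 3, with C(n-1, i) mod 3 by Lucas' theorem.
--     val = {"R": 0, "G": 1, "B": 2}
--     m = len(colors) - 1
--     total = 0
--     for i, c in enumerate(colors):
--         coef = 1
--         a, b = m, i
--         while b > 0:
--             da, db = a % 3, b % 3
--             if db > da:
--                 coef = 0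
--                 break
--             if da == 2 and db == 1:
--                 coef = (coef * 2) % 3
--             a //= 3
--             b //= 3
--         total += coef * val[c]
--     sign = 1 if m % 2 == 0 else -1
--     return "RGB"[(sign * total) % 3]
-- ===== Notes on version B (the rewrite author's own statement) =====
-- stated objective: faster
-- what changed: Replaces the O(n^2) repeated pairwise reduction with a closed form: under R,G,B -> 0,1,2 each step is x,y -> -(x+y) mod 3, so the answer is (-1)^(n-1) * sum(C(n-1,i)*c_i) mod 3 with each C(n-1,i) mod 3 computed by Lucas' theorem, plus a one-distinct-colour fast path.
import Mathlib
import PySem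

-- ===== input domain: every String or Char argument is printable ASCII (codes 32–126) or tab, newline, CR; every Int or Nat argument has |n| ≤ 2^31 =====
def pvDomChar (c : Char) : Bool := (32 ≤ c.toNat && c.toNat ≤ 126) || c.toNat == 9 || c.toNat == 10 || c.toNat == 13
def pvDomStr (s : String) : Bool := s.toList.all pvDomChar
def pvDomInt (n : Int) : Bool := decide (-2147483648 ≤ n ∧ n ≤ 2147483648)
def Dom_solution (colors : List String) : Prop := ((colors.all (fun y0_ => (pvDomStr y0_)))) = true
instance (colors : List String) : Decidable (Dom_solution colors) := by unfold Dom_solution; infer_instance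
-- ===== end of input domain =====

-- B replaces A's O(n^2) pairwise reduction by the closed form
-- (-1)^(n-1) * Σ C(n-1,i)·c_i (mod 3) with C(n-1,i) mod 3 via Lucas' theorem (objective: faster).

-- ===== PORT A =====
-- `remaining, = {"R","G","B"} - {left, right}`: the unpack succeeds only when exactly one
-- colour remains; the ValueError cases are outside Pre_solution ("" stands for the raise).
def pvThird (left right : String) : String :=
  match ["R", "G", "B"].filter (fun c => c != left && c != right) with
  | [x] => x
  | _ => ""

-- one pass of the while-loop body (the `for i in range(len(colors) - 1)` loop)
def pvStepA (colors : List String) : List String :=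
  (PySem.List.pyRange 0 ((colors.length : Int) - 1) 1).foldl
    (fun new_colors i =>
      let left := PySem.List.pyGetD colors i ""
      let right := PySem.List.pyGetD colors (i + 1) ""
      if left = right then new_colors ++ [left] else new_colors ++ [pvThird left right])
    []

-- the pair value appended at loop index i (proof helper, cited by the termination proof chain)
def pvPair (colors : List String) (i : Int) : String :=
  let left := PySem.List.pyGetD colors i ""
  let right := PySem.List.pyGetD colors (i + 1) ""
  if left = right then left else pvThird left right

theorem pvStepA_eq_map (colors : List String) :
    pvStepA colors =
      (PySem.List.pyRange 0 ((colors.length : Int) - 1) 1).map (pvPair colors) := by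
  unfold pvStepA
  have h : ∀ (l : List Int) (acc : List String),
      l.foldl
        (fun new_colors i =>
          let left := PySem.List.pyGetD colors i ""
          let right := PySem.List.pyGetD colors (i + 1) ""
          if left = right then new_colors ++ [left] else new_colors ++ [pvThird left right])
        acc = acc ++ l.map (pvPair colors) := by
    intro l
    induction l with
    | nil => simp
    | cons x xs ih =>
      intro acc
      simp only [List.foldl_cons, List.map_cons, ih, pvPair]
      split <;> simp
  simpa using h _ []

theorem pvStepA_length (colors : List String) :
    (pvStepA colors).length = ((colors.length : Int) - 1).toNat := by
  rw [pvStepA_eq_map, List.length_map, PySem.List.length_pyRange_one]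
  omega

-- the while-loop: colors shrinks by one each pass; finally `return colors[0]`
def solution (colors : List String) : String :=
  if _h : 1 < colors.length then
    solution (pvStepA colors)
  else
    PySem.List.pyGetD colors 0 ""
termination_by colors.length
decreasing_by
  rw [pvStepA_length]; omega

-- ===== PORT B =====
-- val = {"R": 0, "G": 1, "B": 2}
def pvValD : PySem.Dict String Int :=
  PySem.Dict.ofList [("R", 0), ("G", 1), ("B", 2)]

-- val[c]; the KeyError cases are outside Pre_solution (0 stands for the raise)
def pvVal (c : String) : Int := (PySem.Dict.get? pvValD c).getD 0

-- the `while b > 0` Lucas-digit loop of Source B (break with coef = 0 returns 0)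
def pvLucasLoop (a b coef : Int) : Int :=
  if _h : 0 < b then
    let da := PySem.Int.mod a 3
    let db := PySem.Int.mod b 3
    if da < db then 0
    else
      pvLucasLoop (PySem.Int.floordiv a 3) (PySem.Int.floordiv b 3)
        (if da = 2 ∧ db = 1 then PySem.Int.mod (coef * 2) 3 else coef)
  else coef
termination_by b.toNat
decreasing_by
  have h3 : PySem.Int.floordiv b 3 = b / 3 := PySem.Int.floordiv_eq_ediv_of_pos (by omega)
  rw [h3]; omega

def solution_alt (colors : List String) : String :=
  if (PySem.Set.ofList colors).length = 1 then PySem.List.pyGetD colors 0 ""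
  else
    let n : Int := colors.length
    let m := n - 1
    let total :=
      (PySem.List.enumerate colors 0).foldl
        (fun total p => total + pvLucasLoop m p.1 1 * pvVal p.2) 0
    let sign : Int := if PySem.Int.mod m 2 = 0 then 1 else -1
    ((PySem.Str.pyGet? "RGB" (PySem.Int.mod (sign * total) 3)).map
      (fun ch => String.singleton ch)).getD ""

-- ===== PRECONDITION & SPEC =====
-- Pre_ excludes exactly the inputs where A raises: the empty list (IndexError at
-- colors[0]) and non-constant lists with an element outside {"R","G","B"}, on which A
-- raises ValueError (unpacking a set of size ≠ 1) at some unequal adjacent pair.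
def Pre_solution (colors : List String) : Prop :=
  colors ≠ [] ∧
    ((∀ x ∈ colors, x = colors.headD "") ∨ ∀ c ∈ colors, c = "R" ∨ c = "G" ∨ c = "B")
instance (colors : List String) : Decidable (Pre_solution colors) := by
  unfold Pre_solution; infer_instance

def pvWitness_solution : List String := ["R", "G", "B"]

def Spec_solution (colors : List String) (out : String) : Prop := out = solution_alt colors
instance (colors : List String) (out : String) : Decidable (Spec_solution colors out) := by
  unfold Spec_solution; infer_instance

-- ===== CLAIM (what is proved, stated in full; the proofs are below) =====
def Claim_equal_solution : Prop :=
  ∀ (colors : List String), Dom_solution colors → Pre_solution colors →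
    Spec_solution colors (solution colors)

-- ===== LEMMAS AND PROOFS =====

-- encode colours as Z/3: R=0, G=1, B=2; dec is the inverse
def pvEnc (c : String) : ZMod 3 := if c = "R" then 0 else if c = "G" then 1 else 2
def pvDec (x : ZMod 3) : String := if x = 0 then "R" else if x = 1 then "G" else "B"
def pvOk (c : String) : Prop := c = "R" ∨ c = "G" ∨ c = "B"

-- the closed-form value: Σ_{i<n} C(n-1,i)·enc(c_i) in Z/3
def pvFv (v : List String) : ZMod 3 :=
  ∑ i ∈ Finset.range v.length, (Nat.choose (v.length - 1) i : ZMod 3) * pvEnc (v.getD i "")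

theorem pvOk_dec : ∀ x : ZMod 3, pvOk (pvDec x) := by
  intro x; unfold pvOk pvDec; fin_cases x <;> decide

theorem pvEnc_dec : ∀ x : ZMod 3, pvEnc (pvDec x) = x := by decide

theorem pvDec_enc (c : String) (h : pvOk c) : pvDec (pvEnc c) = c := by
  rcases h with rfl | rfl | rfl <;> decide

-- one A-step on a pair of colours is x, y ↦ -(x+y) in Z/3
theorem pvPair_ok (l r : String) (hl : pvOk l) (hr : pvOk r) :
    (if l = r then l else pvThird l r) = pvDec (-(pvEnc l + pvEnc r)) := by
  rcases hl with rfl | rfl | rfl <;> rcases hr with rfl | rfl | rfl <;> decide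

theorem pv_getD_map_range {α : Type} (g : ℕ → α) (d : α) (k i : ℕ) (h : i < k) :
    (((List.range k).map g).getD i d) = g i := by
  rw [List.getD_eq_getElem?_getD]
  simp [h]

-- Pascal's rule pushed through the sum, in Z/3
theorem pv_pascal_sum (m : ℕ) (e : ℕ → ZMod 3) :
    ∑ i ∈ Finset.range (m + 1), (Nat.choose m i : ZMod 3) * (e i + e (i + 1)) =
      ∑ i ∈ Finset.range (m + 2), (Nat.choose (m + 1) i : ZMod 3) * e i := by
  have hR : ∑ i ∈ Finset.range (m + 2), (Nat.choose (m + 1) i : ZMod 3) * e i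
      = ∑ i ∈ Finset.range (m + 1), (Nat.choose (m + 1) (i + 1) : ZMod 3) * e (i + 1)
        + (Nat.choose (m + 1) 0 : ZMod 3) * e 0 := Finset.sum_range_succ' _ _
  have hM : ∑ i ∈ Finset.range (m + 2), (Nat.choose m i : ZMod 3) * e i
      = ∑ i ∈ Finset.range (m + 1), (Nat.choose m (i + 1) : ZMod 3) * e (i + 1)
        + (Nat.choose m 0 : ZMod 3) * e 0 := Finset.sum_range_succ' _ _
  have hM2 : ∑ i ∈ Finset.range (m + 2), (Nat.choose m i : ZMod 3) * e i
      = ∑ i ∈ Finset.range (m + 1), (Nat.choose m i : ZMod 3) * e i := by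
    rw [Finset.sum_range_succ, Nat.choose_succ_self]
    simp
  rw [hR]
  simp only [Nat.choose_succ_succ, Nat.cast_add, add_mul, Finset.sum_add_distrib]
  rw [add_assoc]
  have hmix : (∑ i ∈ Finset.range (m + 1), (Nat.choose m (i + 1) : ZMod 3) * e (i + 1))
        + (Nat.choose (m + 1) 0 : ZMod 3) * e 0
      = ∑ i ∈ Finset.range (m + 1), (Nat.choose m i : ZMod 3) * e i := by
    rw [← hM2, hM]
    simp
  rw [hmix]
  simp only [mul_add, Finset.sum_add_distrib]
  ring

-- the step list, as a map over Nat range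
theorem pvStepA_eq_map_nat (colors : List String) :
    pvStepA colors =
      (List.range (colors.length - 1)).map (fun i : ℕ => pvPair colors (i : Int)) := by
  rw [pvStepA_eq_map, PySem.List.pyRange_one, List.map_map]
  have h1 : ((colors.length : Int) - 1 - 0).toNat = colors.length - 1 := by omega
  rw [h1]
  simp [Function.comp_def]

theorem pvPair_eq_dec (colors : List String) (hok : ∀ c ∈ colors, pvOk c)
    (i : ℕ) (h : i + 1 < colors.length) :
    pvPair colors (i : Int) =
      pvDec (-(pvEnc (colors.getD i "") + pvEnc (colors.getD (i + 1) ""))) := by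
  have hl : PySem.List.pyGetD colors (i : Int) "" = colors.getD i "" := by
    simp [PySem.List.pyGetD_natCast]
  have hr : PySem.List.pyGetD colors ((i : Int) + 1) "" = colors.getD (i + 1) "" := by
    rw [show ((i : Int) + 1) = ((i + 1 : ℕ) : Int) by push_cast; ring,
      PySem.List.pyGetD_natCast]
  unfold pvPair
  rw [hl, hr]
  have hm1 : colors.getD i "" ∈ colors := by
    rw [List.getD_eq_getElem _ _ (by omega)]; exact List.getElem_mem _
  have hm2 : colors.getD (i + 1) "" ∈ colors := by
    rw [List.getD_eq_getElem _ _ (by omega)]; exact List.getElem_mem _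
  exact pvPair_ok _ _ (hok _ hm1) (hok _ hm2)

theorem pvStepA_ok (colors : List String) (h2 : 2 ≤ colors.length)
    (hok : ∀ c ∈ colors, pvOk c) : ∀ c ∈ pvStepA colors, pvOk c := by
  rw [pvStepA_eq_map_nat]
  intro c hc
  rw [List.mem_map] at hc
  obtain ⟨i, hi, rfl⟩ := hc
  rw [List.mem_range] at hi
  rw [pvPair_eq_dec colors hok i (by omega)]
  exact pvOk_dec _

theorem pvFv_step (colors : List String) (h2 : 2 ≤ colors.length)
    (hok : ∀ c ∈ colors, pvOk c) :
    pvFv (pvStepA colors) = -pvFv colors := by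
  have hlen : (pvStepA colors).length = colors.length - 1 := by
    rw [pvStepA_eq_map_nat, List.length_map, List.length_range]
  unfold pvFv
  rw [hlen]
  have hterm : ∀ i ∈ Finset.range (colors.length - 1),
      (Nat.choose (colors.length - 1 - 1) i : ZMod 3) * pvEnc ((pvStepA colors).getD i "")
      = (Nat.choose (colors.length - 1 - 1) i : ZMod 3) *
          (-(pvEnc (colors.getD i "") + pvEnc (colors.getD (i + 1) ""))) := by
    intro i hi
    rw [Finset.mem_range] at hi
    rw [pvStepA_eq_map_nat, pv_getD_map_range _ _ _ _ hi,
      pvPair_eq_dec colors hok i (by omega), pvEnc_dec]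
  rw [Finset.sum_congr rfl hterm]
  obtain ⟨m, hm⟩ : ∃ m, colors.length = m + 2 := ⟨colors.length - 2, by omega⟩
  rw [hm]
  simp only [show m + 2 - 1 = m + 1 by omega, Nat.add_sub_cancel]
  rw [show ∀ (f : ℕ → ZMod 3),
      (∑ i ∈ Finset.range (m + 1), (Nat.choose m i : ZMod 3) * (-(f i + f (i + 1))))
      = -(∑ i ∈ Finset.range (m + 1), (Nat.choose m i : ZMod 3) * (f i + f (i + 1)))
    from fun f => by
      rw [← Finset.sum_neg_distrib]; exact Finset.sum_congr rfl (fun i _ => by ring)]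
  rw [pv_pascal_sum m (fun i => pvEnc (colors.getD i ""))]

-- A computes the closed form
theorem pvA_closed : ∀ (n : ℕ) (colors : List String), colors.length = n →
    colors ≠ [] → (∀ c ∈ colors, pvOk c) →
    solution colors = pvDec ((-1) ^ (n - 1) * pvFv colors) := by
  intro n
  induction n using Nat.strong_induction_on with
  | _ n ih =>
    intro colors hn hne hok
    by_cases h1 : 1 < colors.length
    · rw [solution]
      simp only [h1, dif_pos]
      have hstep_len : (pvStepA colors).length = n - 1 := by rw [pvStepA_length]; omega
      have hne' : pvStepA colors ≠ [] := by
        intro hnil; rw [hnil] at hstep_len; simp at hstep_len; omega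
      rw [ih (n - 1) (by omega) (pvStepA colors) hstep_len hne'
          (pvStepA_ok colors (by omega) hok),
        pvFv_step colors (by omega) hok]
      congr 1
      rw [show ((-1 : ZMod 3)) ^ (n - 1) = (-1) ^ (n - 1 - 1) * (-1) from by
        rw [← pow_succ]; congr 1; omega]
      ring
    · have hlen1 : colors.length = 1 := by
        rcases colors with _ | ⟨c, cs⟩
        · exact absurd rfl hne
        · simp only [List.length_cons] at h1 ⊢; omega
      obtain ⟨c, rfl⟩ := List.length_eq_one_iff.mp hlen1
      rw [solution]
      simp only [h1, dif_neg, not_false_iff]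
      have hA : PySem.List.pyGetD [c] 0 "" = c := by
        simp [PySem.List.pyGetD, PySem.List.pyGet?, PySem.List.pyIdx?]
      rw [hA]
      have hn1 : n = 1 := by simp at hn; omega
      subst hn1
      have hFv : pvFv [c] = pvEnc c := by
        unfold pvFv; simp
      rw [hFv]
      simp only [Nat.sub_self, pow_zero, one_mul]
      exact (pvDec_enc c (hok c (by simp))).symm

theorem pv_choose_digit (x y : ℕ) (hx : x < 3) (hy : y < 3) (hyx : y ≤ x)
    (hne : ¬(x = 2 ∧ y = 1)) : Nat.choose x y = 1 := by
  interval_cases x <;> interval_cases y <;> simp_all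

theorem pv_lucas3 (a b : ℕ) :
    ((Nat.choose a b : ℕ) : ZMod 3) =
      ((Nat.choose (a % 3) (b % 3) : ℕ) : ZMod 3) * ((Nat.choose (a / 3) (b / 3) : ℕ) : ZMod 3) := by
  haveI : Fact (Nat.Prime 3) := ⟨by norm_num⟩
  have h := (Choose.choose_modEq_choose_mod_mul_choose_div_nat (p := 3) (n := a) (k := b))
  rw [← Nat.cast_mul]
  exact (ZMod.natCast_eq_natCast_iff _ _ _).mpr h

-- B side: the Lucas loop computes coef·C(a,b) mod 3
theorem pvLucasLoop_spec : ∀ (b a : ℕ) (coef : Int), (coef = 1 ∨ coef = 2) →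
    pvLucasLoop (a : Int) (b : Int) coef =
      (((coef : ZMod 3) * (Nat.choose a b : ZMod 3)).val : Int) := by
  intro b
  induction b using Nat.strong_induction_on with
  | _ b ih =>
    intro a coef hcoef
    by_cases hb : 0 < b
    · rw [pvLucasLoop]
      have hbpos : (0 : Int) < (b : Int) := by exact_mod_cast hb
      rw [dif_pos hbpos]
      have hma : PySem.Int.mod (a : Int) 3 = ((a % 3 : ℕ) : Int) := by
        exact_mod_cast PySem.Int.mod_natCast a 3
      have hmb : PySem.Int.mod (b : Int) 3 = ((b % 3 : ℕ) : Int) := by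
        exact_mod_cast PySem.Int.mod_natCast b 3
      have hfa : PySem.Int.floordiv (a : Int) 3 = ((a / 3 : ℕ) : Int) := by
        exact_mod_cast PySem.Int.floordiv_natCast a 3
      have hfb : PySem.Int.floordiv (b : Int) 3 = ((b / 3 : ℕ) : Int) := by
        exact_mod_cast PySem.Int.floordiv_natCast b 3
      simp only [hma, hmb, hfa, hfb]
      by_cases hlt : a % 3 < b % 3
      · rw [if_pos (by exact_mod_cast hlt)]
        have hz : ((Nat.choose a b : ℕ) : ZMod 3) = 0 := by
          rw [pv_lucas3, Nat.choose_eq_zero_of_lt hlt]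
          simp
        rw [hz, mul_zero]
        simp
      · rw [if_neg (by exact_mod_cast hlt)]
        set coef' := if ((a % 3 : ℕ) : Int) = 2 ∧ ((b % 3 : ℕ) : Int) = 1
            then PySem.Int.mod (coef * 2) 3 else coef with hcoef'
        have hcoef'12 : coef' = 1 ∨ coef' = 2 := by
          rw [hcoef']
          split
          · rcases hcoef with rfl | rfl
            · right; decide
            · left; decide
          · exact hcoef
        rw [ih (b / 3) (Nat.div_lt_self hb (by omega)) (a / 3) coef' hcoef'12]
        congr 1
        have hstep : (coef' : ZMod 3) = (coef : ZMod 3) * ((Nat.choose (a % 3) (b % 3) : ℕ) : ZMod 3) := by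
          rw [hcoef']
          by_cases hc : ((a % 3 : ℕ) : Int) = 2 ∧ ((b % 3 : ℕ) : Int) = 1
          · obtain ⟨h2, h1⟩ := hc
            have ha2 : a % 3 = 2 := by exact_mod_cast h2
            have hb1 : b % 3 = 1 := by exact_mod_cast h1
            rw [if_pos ⟨h2, h1⟩, ha2, hb1]
            rcases hcoef with rfl | rfl <;> decide
          · rw [if_neg hc]
            have h1 : Nat.choose (a % 3) (b % 3) = 1 := by
              apply pv_choose_digit _ _ (Nat.mod_lt _ (by omega)) (Nat.mod_lt _ (by omega))
                (by omega)
              intro ⟨hx, hy⟩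
              exact hc ⟨by exact_mod_cast hx, by exact_mod_cast hy⟩
            rw [h1]
            simp
        rw [pv_lucas3 a b, hstep]
        ring_nf
    · have hb0 : b = 0 := by omega
      subst hb0
      rw [pvLucasLoop]
      rw [dif_neg (by omega)]
      rw [Nat.choose_zero_right]
      rcases hcoef with rfl | rfl <;> decide


theorem pvVal_enc (c : String) (h : pvOk c) : ((pvVal c : Int) : ZMod 3) = pvEnc c := by
  rcases h with rfl | rfl | rfl <;> decide

theorem pv_total_cast : ∀ (xs : List String) (s : ℕ) (t : Int) (m : ℕ),
    (∀ c ∈ xs, pvOk c) →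
    (((PySem.List.enumerate xs (s : Int)).foldl
        (fun t p => t + pvLucasLoop (m : Int) p.1 1 * pvVal p.2) t : Int) : ZMod 3) =
      (t : ZMod 3) +
        ∑ i ∈ Finset.range xs.length, (Nat.choose m (s + i) : ZMod 3) * pvEnc (xs.getD i "") := by
  intro xs
  induction xs with
  | nil => intro s t m _; simp [PySem.List.enumerate]
  | cons x xs ih =>
    intro s t m hok
    rw [PySem.List.enumerate_cons, List.foldl_cons]
    rw [show (s : Int) + 1 = ((s + 1 : ℕ) : Int) by push_cast; ring]
    rw [ih (s + 1) _ m (fun c hc => hok c (List.mem_cons_of_mem _ hc))]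
    have hx : ((( t + pvLucasLoop (m : Int) (s : Int) 1 * pvVal x : Int)) : ZMod 3)
        = (t : ZMod 3) + (Nat.choose m s : ZMod 3) * pvEnc x := by
      rw [pvLucasLoop_spec s m 1 (Or.inl rfl)]
      push_cast
      rw [pvVal_enc x (hok x (List.mem_cons_self))]
      simp
    rw [hx]
    have hsum : ∑ i ∈ Finset.range (x :: xs).length,
        (Nat.choose m (s + i) : ZMod 3) * pvEnc ((x :: xs).getD i "")
        = (Nat.choose m s : ZMod 3) * pvEnc x
          + ∑ i ∈ Finset.range xs.length,
              (Nat.choose m (s + 1 + i) : ZMod 3) * pvEnc (xs.getD i "") := by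
      rw [List.length_cons, Finset.sum_range_succ']
      simp only [List.getD_cons_succ, List.getD_cons_zero, Nat.add_zero]
      rw [add_comm]
      congr 1
      apply Finset.sum_congr rfl
      intro i _
      rw [show s + (i + 1) = s + 1 + i from by omega]
    rw [hsum]
    ring

theorem pv_rgb_index : ∀ x : ZMod 3,
    ((PySem.Str.pyGet? "RGB" ((x.val : Int))).map (fun ch => String.singleton ch)).getD "" =
      pvDec x := by decide

-- B computes the closed form
theorem pvB_closed (colors : List String) (h2 : 2 ≤ colors.length)
    (hset : (PySem.Set.ofList colors).length ≠ 1)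
    (hok : ∀ c ∈ colors, pvOk c) :
    solution_alt colors = pvDec ((-1) ^ (colors.length - 1) * pvFv colors) := by
  simp only [solution_alt]
  rw [if_neg hset]
  have hm : (colors.length : Int) - 1 = ((colors.length - 1 : ℕ) : Int) := by omega
  rw [hm]
  set k := colors.length - 1 with hk
  set total := (PySem.List.enumerate colors (0 : Int)).foldl
      (fun total p => total + pvLucasLoop ((k : ℕ) : Int) p.1 1 * pvVal p.2) (0 : Int)
    with htotal
  have htc : ((total : Int) : ZMod 3) = pvFv colors := by
    have h0 := pv_total_cast colors 0 ((0 : ℕ) : Int) k hok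
    simp only [Nat.cast_zero] at h0
    rw [htotal, h0]
    unfold pvFv
    rw [← hk]
    simp
  set sign : Int := if PySem.Int.mod ((k : ℕ) : Int) 2 = 0 then 1 else -1 with hsign
  have hsc : ((sign : Int) : ZMod 3) = (-1) ^ k := by
    rw [hsign]
    have hmod2 : PySem.Int.mod ((k : ℕ) : Int) 2 = ((k % 2 : ℕ) : Int) := by
      exact_mod_cast PySem.Int.mod_natCast k 2
    rw [hmod2]
    rcases Nat.even_or_odd k with he | ho
    · rw [if_pos (by exact_mod_cast (Nat.even_iff.mp he)), he.neg_one_pow]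
      simp
    · have h1 : k % 2 = 1 := Nat.odd_iff.mp ho
      rw [if_neg (by simp [h1]), ho.neg_one_pow]
      simp
  have hidx : PySem.Int.mod (sign * total) 3 =
      (((((sign * total : Int)) : ZMod 3)).val : Int) := by
    rw [PySem.Int.mod_eq_emod_of_pos (by norm_num)]
    exact (ZMod.val_intCast _).symm
  rw [hidx, pv_rgb_index]
  congr 1
  push_cast
  rw [hsc, htc]


-- constant lists: both sides return the (single) colour
theorem pv_nodup_eq_singleton {α : Type} (l : List α) (c : α) (hn : l.Nodup)
    (hc : c ∈ l) (hall : ∀ x ∈ l, x = c) : l = [c] := by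
  cases l with
  | nil => cases hc
  | cons x t =>
    have hx : x = c := hall x (List.mem_cons_self)
    have ht : t = [] := by
      cases t with
      | nil => rfl
      | cons y u =>
        have hy : y = c := hall y (by simp)
        rw [List.nodup_cons] at hn
        exact absurd (by rw [hx, ← hy]; simp : x ∈ y :: u) hn.1
    rw [hx, ht]

theorem pv_headD_mem (colors : List String) (hne : colors ≠ []) :
    colors.headD "" ∈ colors := by
  cases colors with
  | nil => exact absurd rfl hne
  | cons x t => simp

theorem pv_set_len_one (colors : List String) (hne : colors ≠ [])
    (hconst : ∀ x ∈ colors, x = colors.headD "") :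
    (PySem.Set.ofList colors).length = 1 := by
  rw [pv_nodup_eq_singleton (PySem.Set.ofList colors) (colors.headD "")
    (PySem.Set.nodup_ofList colors)
    ((PySem.Set.mem_ofList _ _).mpr (pv_headD_mem colors hne))
    (fun x hx => hconst x ((PySem.Set.mem_ofList _ _).mp hx))]
  rfl

theorem pv_set_len_ne_one (colors : List String) (a b : String) (ha : a ∈ colors)
    (hb : b ∈ colors) (hab : a ≠ b) : (PySem.Set.ofList colors).length ≠ 1 := by
  intro h1
  obtain ⟨x, hx⟩ := List.length_eq_one_iff.mp h1
  have ha' : a ∈ PySem.Set.ofList colors := (PySem.Set.mem_ofList _ _).mpr ha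
  have hb' : b ∈ PySem.Set.ofList colors := (PySem.Set.mem_ofList _ _).mpr hb
  rw [hx] at ha' hb'
  simp at ha' hb'
  exact hab (ha'.trans hb'.symm)

theorem pvStepA_replicate (n : ℕ) (c : String) :
    pvStepA (List.replicate (n + 2) c) = List.replicate (n + 1) c := by
  rw [pvStepA_eq_map_nat, List.length_replicate]
  apply List.eq_replicate_iff.mpr
  constructor
  · simp
  · intro x hx
    rw [List.mem_map] at hx
    obtain ⟨i, hi, rfl⟩ := hx
    rw [List.mem_range] at hi
    unfold pvPair
    have hg : ∀ (j : ℕ), j < n + 2 →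
        PySem.List.pyGetD (List.replicate (n + 2) c) ((j : Int)) "" = c := by
      intro j hj
      rw [PySem.List.pyGetD_natCast]
      simp [hj]
    rw [show ((i : Int) + 1) = ((i + 1 : ℕ) : Int) by push_cast; ring]
    rw [hg i (by omega), hg (i + 1) (by omega)]
    simp

theorem pvA_replicate : ∀ (n : ℕ) (c : String), solution (List.replicate (n + 1) c) = c := by
  intro n
  induction n with
  | zero =>
    intro c
    rw [solution]
    rw [dif_neg (by simp)]
    simp [PySem.List.pyGetD, PySem.List.pyGet?, PySem.List.pyIdx?]
  | succ k ih =>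
    intro c
    rw [solution]
    rw [dif_pos (by simp)]
    rw [show k + 1 + 1 = k + 2 from rfl, pvStepA_replicate k c]
    exact ih c

theorem pvA_const (colors : List String) (hne : colors ≠ [])
    (hconst : ∀ x ∈ colors, x = colors.headD "") :
    solution colors = colors.headD "" := by
  have hrep := List.eq_replicate_of_mem hconst
  obtain ⟨k, hk⟩ : ∃ k, colors.length = k + 1 := by
    cases colors with
    | nil => exact absurd rfl hne
    | cons x t => exact ⟨t.length, by simp⟩
  rw [hrep, hk]
  exact pvA_replicate k _

theorem pvB_const (colors : List String) (hne : colors ≠ [])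
    (hconst : ∀ x ∈ colors, x = colors.headD "") :
    solution_alt colors = colors.headD "" := by
  simp only [solution_alt]
  rw [if_pos (pv_set_len_one colors hne hconst)]
  cases colors with
  | nil => exact absurd rfl hne
  | cons x t => simp [PySem.List.pyGetD, PySem.List.pyGet?, PySem.List.pyIdx?]

-- ===== VERDICT (by name: the statement is the Claim_ definition above) =====
theorem solution_spec : Claim_equal_solution := by
  intro colors _hdom hpre
  unfold Spec_solution
  obtain ⟨hne, hcase⟩ := hpre
  by_cases hconst : ∀ x ∈ colors, x = colors.headD ""
  · rw [pvA_const colors hne hconst, pvB_const colors hne hconst]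
  · have hok : ∀ c ∈ colors, pvOk c := by
      rcases hcase with h1 | h
      · exact absurd h1 hconst
      · exact h
    push Not at hconst
    obtain ⟨b, hb, hbne⟩ := hconst
    have h2 : 2 ≤ colors.length := by
      rcases colors with _ | ⟨c, _ | ⟨d, t⟩⟩
      · exact absurd rfl hne
      · simp at hb
        exact absurd hb hbne
      · simp
    have hset : (PySem.Set.ofList colors).length ≠ 1 :=
      pv_set_len_ne_one colors b (colors.headD "") hb (pv_headD_mem colors hne) hbne
    rw [pvA_closed colors.length colors rfl hne hok, pvB_closed colors h2 hset hok]
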